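-- pv_equiv track=rewrite | github.com/frankhereford/led_board | redis_experiment/push_ordered_values.py | generate_tuples
-- ===== SOURCE A (Python) =====
-- def generate_tuples(step=5):
--     for r in range(0, 256, step):
--         yield (r, 0, 0)
--     for g in range(0, 256, step):
--         yield (255, g, 0)
--     for b in range(0, 256, step):
--         yield (255, 255, b)
--     for r in reversed(range(0, 256, step)):
--         yield (r, 255, 255)
--     for g in reversed(range(0, 256, step)):
--         yield (0, g, 255)
--     for b in reversed(range(0, 256, step)):
--         yield (0, 0, b)
-- ===== SOURCE B (Python) =====
-- def generate_tuples(step=5):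
--     # Closed-form indexed generation: the whole cycle has 6*n tuples, where
--     # n = len(range(0, 256, step)).  For global index i, q = i // n names the
--     # ramp (0..5), k = i % n the position in it; ramps 0-2 sweep up, 3-5 sweep
--     # down; the swept channel is q % 3, and a fixed channel j is 255 exactly
--     # when it lies on the same side of the swept channel as the sweep direction
--     # dictates ((j < c) == (q < 3)), else 0.
--     n = len(range(0, 256, step))
--     for i in range(6 * n):
--         q, k = divmod(i, n)
--         c = q % 3
--         v = (k if q < 3 else n - 1 - k) * step
--         yield tuple(v if j == c else (255 if (j < c) == (q < 3) else 0)
--                     for j in range(3))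
-- ===== Notes on version B (the rewrite author's own statement) =====
-- stated objective: alternative
-- what changed: Replaces A's six unrolled sweep loops by one closed-form indexed loop over range(6*n): each tuple is computed arithmetically from q = i // n and k = i % n (which ramp, position, direction, and the fixed 255/0 channels from the side condition (j < c) == (q < 3)).
import Mathlib
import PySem

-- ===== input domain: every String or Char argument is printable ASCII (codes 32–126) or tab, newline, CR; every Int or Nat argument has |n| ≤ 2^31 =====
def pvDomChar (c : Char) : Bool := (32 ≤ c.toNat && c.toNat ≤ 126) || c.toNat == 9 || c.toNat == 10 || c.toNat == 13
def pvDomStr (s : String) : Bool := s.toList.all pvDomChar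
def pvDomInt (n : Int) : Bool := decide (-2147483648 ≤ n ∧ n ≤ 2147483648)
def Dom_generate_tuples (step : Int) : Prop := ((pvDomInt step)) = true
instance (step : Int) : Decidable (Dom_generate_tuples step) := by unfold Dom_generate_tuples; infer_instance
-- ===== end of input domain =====

-- B replaces A's six unrolled sweep loops by one closed-form indexed loop: tuple i of the
-- cycle is computed arithmetically from q = i // n and k = i % n (simpler decomposition).

-- ===== PORT A =====
def generate_tuples (step : Int) : List (Int × Int × Int) :=
  (PySem.List.pyRange 0 256 step).map (fun r => (r, 0, 0)) ++
  (PySem.List.pyRange 0 256 step).map (fun g => (255, g, 0)) ++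
  (PySem.List.pyRange 0 256 step).map (fun b => (255, 255, b)) ++
  (PySem.List.pyRange 0 256 step).reverse.map (fun r => (r, 255, 255)) ++
  (PySem.List.pyRange 0 256 step).reverse.map (fun g => (0, g, 255)) ++
  (PySem.List.pyRange 0 256 step).reverse.map (fun b => (0, 0, b))

-- ===== PORT B =====
-- channel j of the tuple: v if j is the swept channel c, else 255/0 by side and direction
-- (port of Python's 'v if j == c else (255 if (j < c) == (q < 3) else 0)')
def gtChan (q c v j : Int) : Int :=
  if j = c then v else if ((j < c) ↔ (q < 3)) then 255 else 0

-- the loop body: 'q, k = divmod(i, n); c = q % 3; v = (k if q < 3 else n - 1 - k) * step'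
-- (divmod ported as floordiv/mod — exact for n ≠ 0; the loop is empty when n = 0);
-- 'tuple(... for j in range(3))' ported as the explicit triple over j = 0, 1, 2
def gtBody (step n i : Int) : Int × Int × Int :=
  let q := PySem.Int.floordiv i n
  let k := PySem.Int.mod i n
  let c := PySem.Int.mod q 3
  let v := (if q < 3 then k else n - 1 - k) * step
  (gtChan q c v 0, gtChan q c v 1, gtChan q c v 2)

def generate_tuples_alt (step : Int) : List (Int × Int × Int) :=
  let n : Int := ((PySem.List.pyRange 0 256 step).length : Int)
  (PySem.List.pyRange 0 (6 * n) 1).map (gtBody step n)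

-- ===== PRECONDITION & SPEC =====
-- Pre_ excludes only step = 0, on which Python's range(0, 256, 0) raises ValueError (in A and in B).
def Pre_generate_tuples (step : Int) : Prop := step ≠ 0
instance (step : Int) : Decidable (Pre_generate_tuples step) := by unfold Pre_generate_tuples; infer_instance
def pvWitness_generate_tuples : Int := (5)

def Spec_generate_tuples (step : Int) (out : List (Int × Int × Int)) : Prop := out = generate_tuples_alt step
instance (step : Int) (out : List (Int × Int × Int)) : Decidable (Spec_generate_tuples step out) := by unfold Spec_generate_tuples; infer_instance

-- ===== CLAIM (what is proved, stated in full; the proofs are below) =====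
def Claim_equal_generate_tuples : Prop := ∀ (step : Int), Dom_generate_tuples step → Pre_generate_tuples step → Spec_generate_tuples step (generate_tuples step)

-- ===== LEMMAS AND PROOFS =====

-- A's value of tuple t*M + k (t = which ramp, k = position in it), in A's syntactic form
def rhsA (step : Int) (M t k : Nat) : Int × Int × Int :=
  match t with
  | 0 => ((step * (k : Int)), 0, 0)
  | 1 => (255, step * (k : Int), 0)
  | 2 => (255, 255, step * (k : Int))
  | 3 => (step * ((M - 1 - k : Nat) : Int), 255, 255)
  | 4 => (0, step * ((M - 1 - k : Nat) : Int), 255)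
  | _ => (0, 0, step * ((M - 1 - k : Nat) : Int))

lemma range_reverse_map {α : Type} (m : Nat) (f : Nat → α) :
    ((List.range m).map f).reverse = (List.range m).map (fun k => f (m - 1 - k)) := by
  rw [← List.map_reverse, List.range_eq_range', List.reverse_range']
  simp [List.map_map, Function.comp_def, List.range_eq_range']

lemma range_six (m : Nat) :
    List.range (6 * m) = List.range m
      ++ (List.range m).map (fun k => m + k)
      ++ (List.range m).map (fun k => m + m + k)
      ++ (List.range m).map (fun k => m + m + m + k)
      ++ (List.range m).map (fun k => m + m + m + m + k)
      ++ (List.range m).map (fun k => m + m + m + m + m + k) := by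
  conv_lhs => rw [show 6 * m = m + m + m + m + m + m from by ring]
  rw [List.range_add, List.range_add, List.range_add, List.range_add, List.range_add]

lemma gtBody_at (step : Int) (M t k : Nat) (hM : 0 < M) (hk : k < M) (ht : t < 6) :
    gtBody step (M : Int) ((t * M + k : Nat) : Int) = rhsA step M t k := by
  have h1 : (t * M + k) / M = t := by
    rw [Nat.mul_comm, Nat.mul_add_div hM, Nat.div_eq_of_lt hk]
    omega
  have h2 : (t * M + k) % M = k := by
    rw [Nat.mul_comm, Nat.mul_add_mod]
    exact Nat.mod_eq_of_lt hk
  have hq : PySem.Int.floordiv ((t * M + k : Nat) : Int) ((M : Nat) : Int) = ((t : Nat) : Int) := by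
    rw [PySem.Int.floordiv_natCast, h1]
  have hm : PySem.Int.mod ((t * M + k : Nat) : Int) ((M : Nat) : Int) = ((k : Nat) : Int) := by
    rw [PySem.Int.mod_natCast, h2]
  have hc : ((M - 1 - k : Nat) : Int) = (M : Int) - 1 - (k : Int) := by omega
  have m03 : PySem.Int.mod (0 : Int) 3 = 0 := by decide
  have m13 : PySem.Int.mod (1 : Int) 3 = 1 := by decide
  have m23 : PySem.Int.mod (2 : Int) 3 = 2 := by decide
  have m33 : PySem.Int.mod (3 : Int) 3 = 0 := by decide
  have m43 : PySem.Int.mod (4 : Int) 3 = 1 := by decide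
  have m53 : PySem.Int.mod (5 : Int) 3 = 2 := by decide
  interval_cases t <;>
    simp only [gtBody, hq, hm, rhsA, gtChan, hc, Nat.cast_ofNat, Nat.cast_zero, Nat.cast_one,
      m03, m13, m23, m33, m43, m53] <;>
    norm_num <;>
    ring

-- ===== VERDICT (by name: the statement is the Claim_ definition above) =====
theorem generate_tuples_spec : Claim_equal_generate_tuples := by
  intro step _ hpre
  unfold Spec_generate_tuples
  rcases (lt_or_gt_of_ne hpre) with hs | hs
  · -- step < 0 : range(0, 256, step) is empty; both sides are []
    have hA : PySem.List.pyRange 0 256 step = [] := by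
      rw [PySem.List.pyRange_of_neg _ _ hs]; norm_num
    simp [generate_tuples, generate_tuples_alt, hA, PySem.List.pyRange_one_eq_nil le_rfl]
  · -- step > 0
    set M : Nat := (((256 : Int) + step - 1) / step).toNat with hMdef
    have hR : PySem.List.pyRange 0 256 step
        = (List.range M).map (fun k : Nat => step * (k : Int)) := by
      rw [PySem.List.pyRange_of_pos _ _ hs, if_pos (by norm_num : (0 : Int) < 256)]
      simp only [zero_add, show (256 : Int) - 0 + step - 1 = 256 + step - 1 from by ring]
      rfl
    have hM : 0 < M := by
      have h1 : (1 : Int) ≤ (256 + step - 1) / step := by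
        rw [Int.le_ediv_iff_mul_le hs]; omega
      omega
    have hlen : ((PySem.List.pyRange 0 256 step).length : Int) = (M : Int) := by
      rw [hR]; simp
    have h6 : ((6 * (M : Int)) - 0).toNat = 6 * M := by omega
    have hB0 : generate_tuples_alt step
        = (PySem.List.pyRange 0 (6 * ((PySem.List.pyRange 0 256 step).length : Int)) 1).map
            (gtBody step ((PySem.List.pyRange 0 256 step).length : Int)) := rfl
    have hB : generate_tuples_alt step
        = (List.range M).map (fun k : Nat => gtBody step (M : Int) ((k : Nat) : Int))
          ++ (List.range M).map (fun k : Nat => gtBody step (M : Int) ((M + k : Nat) : Int))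
          ++ (List.range M).map (fun k : Nat => gtBody step (M : Int) ((M + M + k : Nat) : Int))
          ++ (List.range M).map (fun k : Nat => gtBody step (M : Int) ((M + M + M + k : Nat) : Int))
          ++ (List.range M).map (fun k : Nat => gtBody step (M : Int) ((M + M + M + M + k : Nat) : Int))
          ++ (List.range M).map (fun k : Nat => gtBody step (M : Int) ((M + M + M + M + M + k : Nat) : Int)) := by
      rw [hB0, hlen, PySem.List.pyRange_one, h6, range_six]
      simp [List.map_map, Function.comp_def]
    rw [hB]
    unfold generate_tuples
    rw [hR]
    simp only [range_reverse_map, List.map_map, Function.comp_def]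
    congr 1
    · congr 1
      · congr 1
        · congr 1
          · congr 1
            · refine List.map_congr_left fun k hk => ?_
              rw [List.mem_range] at hk
              have := gtBody_at step M 0 k hM hk (by omega)
              simp only [rhsA, Nat.zero_mul, Nat.zero_add] at this
              exact this.symm
            · refine List.map_congr_left fun k hk => ?_
              rw [List.mem_range] at hk
              have := gtBody_at step M 1 k hM hk (by omega)
              simp only [rhsA, Nat.one_mul] at this
              exact this.symm
          · refine List.map_congr_left fun k hk => ?_
            rw [List.mem_range] at hk
            have := gtBody_at step M 2 k hM hk (by omega)
            simp only [rhsA, show 2 * M = M + M from by ring] at this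
            exact this.symm
        · refine List.map_congr_left fun k hk => ?_
          rw [List.mem_range] at hk
          have := gtBody_at step M 3 k hM hk (by omega)
          simp only [rhsA, show 3 * M = M + M + M from by ring] at this
          exact this.symm
      · refine List.map_congr_left fun k hk => ?_
        rw [List.mem_range] at hk
        have := gtBody_at step M 4 k hM hk (by omega)
        simp only [rhsA, show 4 * M = M + M + M + M from by ring] at this
        exact this.symm
    · refine List.map_congr_left fun k hk => ?_
      rw [List.mem_range] at hk
      have := gtBody_at step M 5 k hM hk (by omega)
      simp only [rhsA, show 5 * M = M + M + M + M + M from by ring] at this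
      exact this.symm
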